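-- pv_equiv track=rewrite | github.com/ROMANVIKI/codeforces | romanviki/petyaAndStrings.py | petyaAndStrings
-- ===== SOURCE A (Python) =====
-- def petyaAndStrings(str1, str2):
--     str1_dict = {}
--     str2_dict = {}
--     for x in str1:
--         x = x.lower()
--         if x in str1_dict:
--             str1_dict[x] += 1
--         else:
--             str1_dict[x] = 1
--     for y in str2:
--         y = y.lower()
--         if y in str2_dict:
--             str2_dict[y] += 1
--         else:
--             str2_dict[y] = 1
--
--     if len(str1_dict) > len(str2_dict):
--         return 1
--     elif len(str2_dict) > len(str1_dict):
--         return -1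
--     else:
--         return 0
-- ===== SOURCE B (Python) =====
-- def _distinct(s):
--     cs = sorted(s.lower())
--     n = 0
--     prev = None
--     for c in cs:
--         if prev is None or c != prev:
--             n += 1
--             prev = c
--     return n
--
-- def petyaAndStrings(str1, str2):
--     a = _distinct(str1)
--     b = _distinct(str2)
--     return (a > b) - (a < b)
-- ===== Notes on version B (the rewrite author's own statement) =====
-- stated objective: simpler
-- what changed: A builds a per-character count dictionary for each string (the counts are dead) and compares dictionary lengths; B lowercases and sorts each string and counts group boundaries in one scan to get the distinct-character counts, returning (a > b) - (a < b).
import Mathlib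
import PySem

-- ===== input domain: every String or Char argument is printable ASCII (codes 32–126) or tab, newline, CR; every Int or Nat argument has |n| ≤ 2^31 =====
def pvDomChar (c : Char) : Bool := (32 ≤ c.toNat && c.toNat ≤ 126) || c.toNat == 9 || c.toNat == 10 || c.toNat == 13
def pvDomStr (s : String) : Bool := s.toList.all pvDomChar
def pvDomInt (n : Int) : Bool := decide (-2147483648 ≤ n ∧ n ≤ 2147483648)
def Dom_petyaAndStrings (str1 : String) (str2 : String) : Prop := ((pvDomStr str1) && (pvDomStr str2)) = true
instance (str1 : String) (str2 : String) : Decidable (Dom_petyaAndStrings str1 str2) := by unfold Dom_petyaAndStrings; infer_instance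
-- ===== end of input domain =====

-- B replaces A's two per-character count dictionaries (whose counts are never used) by a
-- sort-then-group scan that counts distinct lowercased characters directly; objective: simpler.

-- ===== PORT A =====
-- the body of 'for x in str1: x = x.lower(); if x in d: d[x] += 1 else: d[x] = 1'
def pvCountLoop (s : String) : PySem.Dict Char Int :=
  s.toList.foldl (fun d c =>
    let x := PySem.Chars.lowerChar c
    if d.contains x then d.insert x (d.getD x 0 + 1) else d.insert x 1) PySem.Dict.empty

def petyaAndStrings (str1 : String) (str2 : String) : Int :=
  let str1_dict := pvCountLoop str1
  let str2_dict := pvCountLoop str2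
  if str1_dict.size > str2_dict.size then 1
  else if str2_dict.size > str1_dict.size then -1
  else 0

-- ===== PORT B =====
-- 'if prev is None or c != prev: n += 1; prev = c'
def pvScanStep (st : Int × Option Char) (c : Char) : Int × Option Char :=
  if st.2 = none ∨ some c ≠ st.2 then (st.1 + 1, some c) else st

def pvDistinct (s : String) : Int :=
  let cs := PySem.List.sorted (PySem.Chars.lower s.toList) (fun x => x) false
  (cs.foldl pvScanStep ((0 : Int), (none : Option Char))).1

def petyaAndStrings_alt (str1 : String) (str2 : String) : Int :=
  let a := pvDistinct str1
  let b := pvDistinct str2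
  (if a > b then (1 : Int) else 0) - (if a < b then (1 : Int) else 0)

-- ===== PRECONDITION & SPEC =====
def Spec_petyaAndStrings (str1 : String) (str2 : String) (out : Int) : Prop := out = petyaAndStrings_alt str1 str2
instance (str1 : String) (str2 : String) (out : Int) : Decidable (Spec_petyaAndStrings str1 str2 out) := by unfold Spec_petyaAndStrings; infer_instance

-- ===== CLAIM (what is proved, stated in full; the proofs are below) =====
def Claim_equal_petyaAndStrings : Prop := ∀ (str1 : String) (str2 : String), Dom_petyaAndStrings str1 str2 → Spec_petyaAndStrings str1 str2 (petyaAndStrings str1 str2)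

-- ===== LEMMAS AND PROOFS =====

-- generic: inserting c costs exactly one more than the erased set
lemma pv_card_insert {s : Finset Char} {c : Char} :
    (insert c s).card = (s.erase c).card + 1 := by
  by_cases h : c ∈ s
  · rw [Finset.insert_eq_self.mpr h, ← Finset.card_erase_add_one h]
  · rw [Finset.card_insert_of_notMem h, Finset.erase_eq_of_notMem h]

-- the scan over a sorted tail with prev = some p, p a lower bound
lemma pv_scan_some (l : List Char) : ∀ (n : Int) (p : Char),
    l.Pairwise (· ≤ ·) → (∀ x ∈ l, p ≤ x) →
    (l.foldl pvScanStep (n, some p)).1 = n + ((l.toFinset.erase p).card : Int) := by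
  induction l with
  | nil => intro n p _ _; simp
  | cons c cs ih =>
    intro n p hsort hlb
    have hc : p ≤ c := hlb c (by simp)
    have hcs : cs.Pairwise (· ≤ ·) := hsort.of_cons
    have hle : ∀ x ∈ cs, c ≤ x := by
      intro x hx; exact List.rel_of_pairwise_cons hsort hx
    by_cases hcp : c = p
    · subst hcp
      have : pvScanStep (n, some c) c = (n, some c) := by simp [pvScanStep]
      rw [List.foldl_cons, this, ih n c hcs hle]
      congr 2
      rw [List.toFinset_cons, Finset.erase_insert_eq_erase]
    · have hstep : pvScanStep (n, some p) c = (n + 1, some c) := by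
        simp [pvScanStep, hcp]
      have hpn : p ∉ cs.toFinset := by
        simp only [List.mem_toFinset]
        intro hmem
        have h1 := hle p hmem
        exact hcp (le_antisymm h1 hc)
      rw [List.foldl_cons, hstep, ih (n + 1) c hcs hle]
      have hset : (c :: cs).toFinset.erase p = insert c cs.toFinset := by
        rw [List.toFinset_cons, Finset.erase_insert_of_ne hcp,
            Finset.erase_eq_of_notMem hpn]
      rw [hset, pv_card_insert]
      push_cast
      ring

-- the scan from the initial state counts the distinct elements of a sorted list
lemma pv_scan_none (l : List Char) (hsort : l.Pairwise (· ≤ ·)) :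
    (l.foldl pvScanStep ((0 : Int), none)).1 = (l.toFinset.card : Int) := by
  cases l with
  | nil => simp
  | cons c cs =>
    have hstep : pvScanStep ((0 : Int), none) c = (1, some c) := by simp [pvScanStep]
    rw [List.foldl_cons, hstep,
        pv_scan_some cs 1 c hsort.of_cons (fun x hx => List.rel_of_pairwise_cons hsort hx)]
    rw [List.toFinset_cons, pv_card_insert]
    push_cast
    ring

lemma pv_distinct_eq (s : String) :
    pvDistinct s = ((PySem.Chars.lower s.toList).toFinset.card : Int) := by
  unfold pvDistinct
  have hperm := PySem.List.sorted_perm (PySem.Chars.lower s.toList) (fun x => x) false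
  rw [pv_scan_none _ (PySem.List.sorted_pairwise (PySem.Chars.lower s.toList) (fun x => x)),
      List.toFinset_eq_of_perm _ _ hperm]

-- a Set (nodup, same members) has the cardinality of the list's Finset
lemma pv_ofList_length (l : List Char) :
    (PySem.Set.ofList l).length = l.toFinset.card := by
  rw [← List.toFinset_card_of_nodup (PySem.Set.nodup_ofList l)]
  congr 1
  ext x
  simp [PySem.Set.mem_ofList]

lemma pv_size_eq (s : String) :
    (pvCountLoop s).size = (PySem.Chars.lower s.toList).toFinset.card := by
  unfold pvCountLoop
  have hfun : (fun (d : PySem.Dict Char Int) c =>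
      let x := PySem.Chars.lowerChar c
      if d.contains x then d.insert x (d.getD x 0 + 1) else d.insert x 1) =
      (fun (d : PySem.Dict Char Int) c =>
      d.insert (PySem.Chars.lowerChar c)
        (if d.contains (PySem.Chars.lowerChar c) then d.getD (PySem.Chars.lowerChar c) 0 + 1 else 1)) := by
    funext d c
    by_cases h : d.contains (PySem.Chars.lowerChar c) <;> simp [h]
  rw [hfun]
  have hkeys : (s.toList.foldl (fun (d : PySem.Dict Char Int) c =>
      d.insert (PySem.Chars.lowerChar c)
        (if d.contains (PySem.Chars.lowerChar c) then d.getD (PySem.Chars.lowerChar c) 0 + 1 else 1))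
      PySem.Dict.empty).keys =
      PySem.Set.update (PySem.Dict.empty (κ := Char) (ν := Int)).keys (s.toList.map PySem.Chars.lowerChar) :=
    PySem.Dict.keys_foldl_insert_key s.toList PySem.Chars.lowerChar
      (fun d c => if d.contains (PySem.Chars.lowerChar c) then d.getD (PySem.Chars.lowerChar c) 0 + 1 else 1)
      PySem.Dict.empty
  have hsize : ∀ d : PySem.Dict Char Int, d.size = d.keys.length := by
    intro d; simp [PySem.Dict.size, PySem.Dict.keys]
  rw [hsize, hkeys]
  have hlower : PySem.Chars.lower s.toList = s.toList.map PySem.Chars.lowerChar := rfl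
  rw [hlower, ← pv_ofList_length]
  simp [PySem.Dict.keys_empty, PySem.Set.update, PySem.Set.ofList_eq_foldl]

-- ===== VERDICT (by name: the statement is the Claim_ definition above) =====
theorem petyaAndStrings_spec : Claim_equal_petyaAndStrings := by
  intro str1 str2 _
  simp only [Spec_petyaAndStrings, petyaAndStrings, petyaAndStrings_alt,
    pv_size_eq, pv_distinct_eq]
  set a := (PySem.Chars.lower str1.toList).toFinset.card
  set b := (PySem.Chars.lower str2.toList).toFinset.card
  split_ifs <;> omega
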